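-- pv_equiv track=rewrite | github.com/yuriyuka/BadouNLP | 仝亚鹏/week04/第四周作业.py | decode_cuts
-- ===== SOURCE A (Python) =====
-- from itertools import groupby
--
-- def decode_cuts(s, labels):
--     """根据标签序列解码切分结果"""
--     # 移除填充和无效标签
--     valid_labels = labels[:len(s)]
--
--     # 根据标签分组
--     groups = []
--     for k, g in groupby(enumerate(valid_labels), key=lambda x: x[1]):
--         if k == -1:  # 跳过填充
--             continue
--         indices = [i for i, _ in g]
--         groups.append(indices)
--
--     # 构建切分结果
--     cuts = []
--     start = 0
--     for group in groups:
--         end = group[-1] + 1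
--         cuts.append(s[start:end])
--         start = end
--
--     return cuts
-- ===== SOURCE B (Python) =====
-- def decode_cuts(s, labels):
--     """根据标签序列解码切分结果"""
--     valid_labels = labels[:len(s)]
--     n = len(valid_labels)
--     cuts = []
--     start = 0
--     for i in range(n):
--         if valid_labels[i] == -1:
--             continue
--         if i + 1 == n or valid_labels[i + 1] != valid_labels[i]:
--             cuts.append(s[start:i + 1])
--             start = i + 1
--     return cuts
-- ===== Notes on version B (the rewrite author's own statement) =====
-- stated objective: simpler
-- what changed: Replaces groupby+enumerate building per-run index lists followed by a second slicing loop with one fused single pass that detects run boundaries (next label differs or end) and maintains only `start`.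
import Mathlib
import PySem

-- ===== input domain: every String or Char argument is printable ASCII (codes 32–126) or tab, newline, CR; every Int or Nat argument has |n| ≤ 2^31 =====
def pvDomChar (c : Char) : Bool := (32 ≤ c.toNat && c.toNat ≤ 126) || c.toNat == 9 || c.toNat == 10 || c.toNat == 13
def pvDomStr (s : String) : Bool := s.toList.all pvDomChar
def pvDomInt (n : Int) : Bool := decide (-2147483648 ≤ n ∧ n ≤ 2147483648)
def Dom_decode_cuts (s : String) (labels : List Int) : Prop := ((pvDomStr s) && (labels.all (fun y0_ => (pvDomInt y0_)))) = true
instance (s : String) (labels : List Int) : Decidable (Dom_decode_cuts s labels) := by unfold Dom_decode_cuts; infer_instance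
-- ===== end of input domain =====

-- B replaces A's groupby-plus-index-lists construction and separate slicing loop by a single
-- boundary-detecting scan that maintains only `start` (objective: simpler).


-- ===== PORT A =====
-- itertools.groupby(enumerate(valid), key=label): runsAux carries the current key and the
-- reversed buffer of indices of the current run; each finished run is flushed as (key, indices).
def runsAux (k : Int) (cur : List Int) : List (Int × Int) → List (Int × List Int)
  | [] => [(k, cur.reverse)]
  | (i, l) :: rest =>
      if l = k then runsAux k (i :: cur) rest
      else (k, cur.reverse) :: runsAux l [i] rest

def runs : List (Int × Int) → List (Int × List Int)
  | [] => []
  | (i, l) :: rest => runsAux l [i] rest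

-- loop body of `for k, g in groupby(...): if k == -1: continue; groups.append(indices)`
def pvGroupsStep (gs : List (List Int)) (kl : Int × List Int) : List (List Int) :=
  if kl.1 = -1 then gs else gs ++ [kl.2]

-- loop body of `for group in groups: end = group[-1] + 1; cuts.append(s[start:end]); start = end`
-- (group[-1]: every flushed group is nonempty, so pyGet? returns a value; .getD 0 totalizes)
def pvCutStep (s : String) (p : List String × Int) (grp : List Int) : List String × Int :=
  let e := (PySem.List.pyGet? grp (-1)).getD 0 + 1
  (p.1 ++ [PySem.Str.slice s (some p.2) (some e)], e)

def decode_cuts (s : String) (labels : List Int) : List String :=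
  let valid := PySem.List.slice labels none (some (PySem.Str.len s))
  let groups := (runs (PySem.List.enumerate valid 0)).foldl pvGroupsStep []
  (groups.foldl (pvCutStep s) ([], 0)).1

-- ===== PORT B =====
-- `for i in range(n)` with lookups valid[i], valid[i+1] only, as the obvious structural
-- recursion over the remaining labels; `rest = []` is Python's `i + 1 == n`.
def altLoop (s : String) (start : Int) (i : Int) : List Int → List String
  | [] => []
  | l :: rest =>
      if l = -1 then altLoop s start (i + 1) rest
      else
        match rest with
        | [] => [PySem.Str.slice s (some start) (some (i + 1))]
        | l' :: _ =>
            if l' ≠ l then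
              PySem.Str.slice s (some start) (some (i + 1)) :: altLoop s (i + 1) (i + 1) rest
            else altLoop s start (i + 1) rest

def decode_cuts_alt (s : String) (labels : List Int) : List String :=
  let valid := PySem.List.slice labels none (some (PySem.Str.len s))
  altLoop s 0 0 valid

-- ===== PRECONDITION & SPEC =====
def Spec_decode_cuts (s : String) (labels : List Int) (out : List String) : Prop := out = decode_cuts_alt s labels
instance (s : String) (labels : List Int) (out : List String) : Decidable (Spec_decode_cuts s labels out) := by unfold Spec_decode_cuts; infer_instance

-- ===== CLAIM (what is proved, stated in full; the proofs are below) =====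
def Claim_equal_decode_cuts : Prop := ∀ (s : String) (labels : List Int), Dom_decode_cuts s labels → Spec_decode_cuts s labels (decode_cuts s labels)

-- ===== LEMMAS AND PROOFS =====

-- building groups by append-fold is filterMap of the runs
lemma foldl_pvGroupsStep (rs : List (Int × List Int)) (gs : List (List Int)) :
    rs.foldl pvGroupsStep gs
      = gs ++ rs.filterMap (fun kl => if kl.1 = -1 then none else some kl.2) := by
  induction rs generalizing gs with
  | nil => simp
  | cons hd tl ih =>
      simp only [List.foldl_cons, List.filterMap_cons, pvGroupsStep]
      by_cases h : hd.1 = -1 <;> simp [h, ih]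

-- invariant: a pending run with key k whose last seen index is i-1 behaves like B's scan on k :: xs
lemma main_lemma (s : String) : ∀ (xs : List Int) (k i start : Int) (cur : List Int)
    (acc : List String), cur.head? = some (i - 1) →
    (((runsAux k cur (PySem.List.enumerate xs i)).filterMap
        (fun kl => if kl.1 = -1 then none else some kl.2)).foldl (pvCutStep s) (acc, start)).1
      = acc ++ altLoop s start (i - 1) (k :: xs) := by
  intro xs
  induction xs with
  | nil =>
      intro k i start cur acc hcur
      by_cases hk : k = -1
      · simp [PySem.List.enumerate, runsAux, hk, altLoop]
      · have hlast : cur.reverse.getLast? = some (i - 1) := by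
          rw [List.getLast?_reverse]; exact hcur
        have h1 : i - 1 + 1 = i := by ring
        simp [PySem.List.enumerate, runsAux, hk, altLoop, pvCutStep,
              PySem.List.pyGet?_neg_one, hlast, h1]
  | cons l rest ih =>
      intro k i start cur acc hcur
      rw [PySem.List.enumerate_cons]
      by_cases hlk : l = k
      · subst hlk
        simp only [runsAux, if_true]
        have := ih l (i + 1) start (i :: cur) acc (by simp)
        rw [show i + 1 - 1 = i by ring] at this
        rw [this]
        by_cases hk : l = -1
        · simp [altLoop, hk, show i - 1 + 1 = i by ring]
        · simp [altLoop, hk, show i - 1 + 1 = i by ring]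
      · simp only [runsAux, if_neg (fun h => hlk h)]
        by_cases hk : k = -1
        · simp only [List.filterMap_cons, if_pos hk]
          have := ih l (i + 1) start [i] acc (by simp)
          rw [show i + 1 - 1 = i by ring] at this
          rw [this]
          simp [altLoop, hk, show i - 1 + 1 = i by ring]
        · simp only [List.filterMap_cons, if_neg hk]
          have hlast : cur.reverse.getLast? = some (i - 1) := by
            rw [List.getLast?_reverse]; exact hcur
          simp only [List.foldl_cons, pvCutStep, PySem.List.pyGet?_neg_one, hlast,
            Option.getD_some]
          rw [show i - 1 + 1 = i by ring]
          have := ih l (i + 1) i [i] (acc ++ [PySem.Str.slice s (some start) (some i)]) (by simp)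
          rw [show i + 1 - 1 = i by ring] at this
          rw [this]
          simp [altLoop, hk, hlk, show i - 1 + 1 = i by ring, List.append_assoc]

lemma decode_cuts_eq_alt (s : String) (labels : List Int) :
    decode_cuts s labels = decode_cuts_alt s labels := by
  simp only [decode_cuts, decode_cuts_alt]
  rw [foldl_pvGroupsStep]
  cases h : PySem.List.slice labels none (some (PySem.Str.len s)) with
  | nil => simp [PySem.List.enumerate, runs, altLoop]
  | cons l rest =>
      rw [PySem.List.enumerate_cons]
      show (((runsAux l [0] (PySem.List.enumerate rest 1)).filterMap _).foldl
              (pvCutStep s) ([], 0)).1 = _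
      have := main_lemma s rest l 1 0 [0] [] (by simp)
      rw [show (1 : Int) - 1 = 0 by ring] at this
      simpa using this

-- ===== VERDICT (by name: the statement is the Claim_ definition above) =====
theorem decode_cuts_spec : Claim_equal_decode_cuts := by
  intro s labels _
  unfold Spec_decode_cuts
  exact decode_cuts_eq_alt s labels
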